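-- pv_equiv track=rewrite | github.com/avigpt/search-and-rescue | mountain.py | get_heights_densities
-- ===== SOURCE A (Python) =====
-- def get_heights_densities(grid):
--     all_heights = []
--     all_densities = []
--     prev_max_height = 0
--     prev_max_density = 0
--     for sector in grid:
--         list_heights = [height for height, density in sector]
--         list_densities = [density for height, density in sector]
--         curr_max_height = max(list_heights)
--         curr_max_density = max(list_densities)
--         if curr_max_height > prev_max_height:
--             prev_max_height = curr_max_height
--         if curr_max_density > prev_max_density:
--             prev_max_density = curr_max_density
--         all_heights.append(list_heights)
--         all_densities.append(list_densities)
--     return all_heights, prev_max_height, all_densities, prev_max_density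
-- ===== SOURCE B (Python) =====
-- def get_heights_densities(grid):
--     if not grid:
--         return [], 0, [], 0
--     sector = grid[0]
--     rest_h, max_h, rest_d, max_d = get_heights_densities(grid[1:])
--     hs = [p[0] for p in sector]
--     ds = [p[1] for p in sector]
--     return [hs] + rest_h, max(max(hs), max_h), [ds] + rest_d, max(max(ds), max_d)
-- ===== Notes on version B (the rewrite author's own statement) =====
-- stated objective: alternative
-- what changed: Replaced A's iterative single fused loop with running-maxima accumulators by a structural recursion on the grid: each call splits off the head sector, recursively processes the tail, then prepends the head's two projected lists and combines its maxima with the tail's via max (the 0 seed is the base case), i.e. a right-fold instead of A's left-fold with state.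
import Mathlib
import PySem

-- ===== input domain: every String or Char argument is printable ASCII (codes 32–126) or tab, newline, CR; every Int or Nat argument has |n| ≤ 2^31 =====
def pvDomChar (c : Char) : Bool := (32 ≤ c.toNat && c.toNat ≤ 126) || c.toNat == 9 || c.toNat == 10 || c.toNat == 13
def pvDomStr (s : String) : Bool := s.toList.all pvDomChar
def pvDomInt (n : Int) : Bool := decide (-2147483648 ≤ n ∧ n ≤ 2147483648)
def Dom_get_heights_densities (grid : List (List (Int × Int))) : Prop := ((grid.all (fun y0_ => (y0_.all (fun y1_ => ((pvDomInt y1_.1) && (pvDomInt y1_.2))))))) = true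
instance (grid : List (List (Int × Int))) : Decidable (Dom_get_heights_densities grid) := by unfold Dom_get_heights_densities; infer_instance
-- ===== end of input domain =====

-- B replaces A's iterative fused loop with running maxima by a structural recursion on the grid
-- (head sector combined with the recursively processed tail; 0 seed at the base case): an alternative decomposition, same cost.
-- Pre_ excludes grids with an empty sector (Python's max([]) raises ValueError in both A and B).


-- ===== PORT A =====
-- Python's max(xs) raises on an empty list: ported as (max? xs id).getD 0, exact under Pre_ (every sector nonempty).
def get_heights_densities (grid : List (List (Int × Int))) : List (List Int) × Int × List (List Int) × Int :=
  grid.foldl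
    (fun (st : List (List Int) × Int × List (List Int) × Int) sector =>
      let list_heights := sector.map (fun p => p.1)
      let list_densities := sector.map (fun p => p.2)
      let curr_max_height := (PySem.List.max? list_heights id).getD 0
      let curr_max_density := (PySem.List.max? list_densities id).getD 0
      let pmh := if curr_max_height > st.2.1 then curr_max_height else st.2.1
      let pmd := if curr_max_density > st.2.2.2 then curr_max_density else st.2.2.2
      (st.1 ++ [list_heights], pmh, st.2.2.1 ++ [list_densities], pmd))
    ([], 0, [], 0)

-- ===== PORT B =====
-- Structural recursion following Source B; max(xs) ported as (max? xs id).getD 0, exact under Pre_.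
def get_heights_densities_alt (grid : List (List (Int × Int))) : List (List Int) × Int × List (List Int) × Int :=
  match grid with
  | [] => ([], 0, [], 0)
  | sector :: rest =>
      let r := get_heights_densities_alt rest
      let hs := sector.map (fun p => p.1)
      let ds := sector.map (fun p => p.2)
      (hs :: r.1, max ((PySem.List.max? hs id).getD 0) r.2.1,
       ds :: r.2.2.1, max ((PySem.List.max? ds id).getD 0) r.2.2.2)

-- ===== PRECONDITION & SPEC =====
-- Pre_ excludes grids containing an empty sector: there Python's max of an empty sequence raises ValueError in A (and in B).
def Pre_get_heights_densities (grid : List (List (Int × Int))) : Prop := ∀ s ∈ grid, s ≠ []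
instance (grid : List (List (Int × Int))) : Decidable (Pre_get_heights_densities grid) := by unfold Pre_get_heights_densities; infer_instance
def pvWitness_get_heights_densities : (List (List (Int × Int))) := [[(1, 2)], [(3, 1), (2, 5)]]
def Spec_get_heights_densities (grid : List (List (Int × Int))) (out : List (List Int) × Int × List (List Int) × Int) : Prop := out = get_heights_densities_alt grid
instance (grid : List (List (Int × Int))) (out : List (List Int) × Int × List (List Int) × Int) : Decidable (Spec_get_heights_densities grid out) := by unfold Spec_get_heights_densities; infer_instance

-- ===== CLAIM =====
def Claim_equal_get_heights_densities : Prop := ∀ (grid : List (List (Int × Int))), Dom_get_heights_densities grid → Pre_get_heights_densities grid → Spec_get_heights_densities grid (get_heights_densities grid)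

-- ===== LEMMAS AND PROOFS =====

-- A's running-max update is max.
theorem if_gt_eq_max (m c : Int) : (if c > m then c else m) = max m c := by
  rw [max_def]; split_ifs <;> omega

-- Characterize B as a right fold over per-sector maxima.
theorem altB (grid : List (List (Int × Int))) :
    get_heights_densities_alt grid
    = (grid.map (fun s => s.map (fun p => p.1)),
       List.foldr max 0 (grid.map (fun s => (PySem.List.max? (s.map (fun p => p.1)) id).getD 0)),
       grid.map (fun s => s.map (fun p => p.2)),
       List.foldr max 0 (grid.map (fun s => (PySem.List.max? (s.map (fun p => p.2)) id).getD 0))) := by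
  induction grid with
  | nil => rfl
  | cons sector rest ih => simp [get_heights_densities_alt, ih]

-- foldl max = foldr max (max is commutative and associative).
theorem foldr_max_max (a b : Int) (l : List Int) :
    List.foldr max (max a b) l = max a (List.foldr max b l) := by
  induction l with
  | nil => rfl
  | cons x l ih => simp [ih]; rw [max_left_comm]

theorem foldl_max_eq_foldr (m : Int) (l : List Int) :
    List.foldl max m l = List.foldr max m l := by
  induction l generalizing m with
  | nil => rfl
  | cons x l ih =>
      rw [List.foldl_cons, ih, List.foldr_cons, ← foldr_max_max]
      rw [max_comm m x]

theorem loopA (grid : List (List (Int × Int))) :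
    ∀ (aH aD : List (List Int)) (mh md : Int),
    grid.foldl
      (fun (st : List (List Int) × Int × List (List Int) × Int) sector =>
        let list_heights := sector.map (fun p => p.1)
        let list_densities := sector.map (fun p => p.2)
        let curr_max_height := (PySem.List.max? list_heights id).getD 0
        let curr_max_density := (PySem.List.max? list_densities id).getD 0
        let pmh := if curr_max_height > st.2.1 then curr_max_height else st.2.1
        let pmd := if curr_max_density > st.2.2.2 then curr_max_density else st.2.2.2
        (st.1 ++ [list_heights], pmh, st.2.2.1 ++ [list_densities], pmd))
      (aH, mh, aD, md)
    = (aH ++ grid.map (fun s => s.map (fun p => p.1)),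
       List.foldl max mh (grid.map (fun s => (PySem.List.max? (s.map (fun p => p.1)) id).getD 0)),
       aD ++ grid.map (fun s => s.map (fun p => p.2)),
       List.foldl max md (grid.map (fun s => (PySem.List.max? (s.map (fun p => p.2)) id).getD 0))) := by
  induction grid with
  | nil => intro aH aD mh md; simp
  | cons sector rest ih =>
      intro aH aD mh md
      simp only [List.foldl_cons, List.map_cons]
      rw [ih]
      simp [if_gt_eq_max]

-- ===== VERDICT =====
theorem get_heights_densities_spec : Claim_equal_get_heights_densities := by
  intro grid _ _
  unfold Spec_get_heights_densities get_heights_densities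
  rw [loopA, altB]
  simp [foldl_max_eq_foldr]
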